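-- pv_equiv track=rewrite | github.com/JulianaOsi/cryptanalysis | tech_indicators.py | close_trend
-- ===== SOURCE A (Python) =====
-- def close_trend(column_close, column_sma, index):
--     close_leads = 0
--     close_lags = 0
--
--     for i in range(5):
--         if column_close[index] < column_sma[index]:
--             close_leads = 0
--             close_lags += 1
--         elif column_close[index] > column_sma[index]:
--             close_lags = 0
--             close_leads += 1
--         elif column_close[index] == column_sma[index]:
--             close_lags += 1
--             close_leads += 1
--         index += 1
--     if close_leads == 5 and close_lags != 5:
--         return 1
--     elif close_lags == 5 and close_leads != 5:
--         return -1
--     else: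
--         return 0
-- ===== SOURCE B (Python) =====
-- def close_trend(column_close, column_sma, index):
--     leads = all(column_close[index + i] >= column_sma[index + i] for i in range(5))
--     lags = all(column_close[index + i] <= column_sma[index + i] for i in range(5))
--     if leads and not lags:
--         return 1
--     elif lags and not leads:
--         return -1
--     else:
--         return 0
-- ===== Notes on version B (the rewrite author's own statement) =====
-- stated objective: simpler
-- what changed: Replaces the two reset/increment counters and the sequential loop by two direct all-quantified comparisons over the 5-point window ('all >= ' / 'all <=') combined with an and-not guard.
import Mathlib
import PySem

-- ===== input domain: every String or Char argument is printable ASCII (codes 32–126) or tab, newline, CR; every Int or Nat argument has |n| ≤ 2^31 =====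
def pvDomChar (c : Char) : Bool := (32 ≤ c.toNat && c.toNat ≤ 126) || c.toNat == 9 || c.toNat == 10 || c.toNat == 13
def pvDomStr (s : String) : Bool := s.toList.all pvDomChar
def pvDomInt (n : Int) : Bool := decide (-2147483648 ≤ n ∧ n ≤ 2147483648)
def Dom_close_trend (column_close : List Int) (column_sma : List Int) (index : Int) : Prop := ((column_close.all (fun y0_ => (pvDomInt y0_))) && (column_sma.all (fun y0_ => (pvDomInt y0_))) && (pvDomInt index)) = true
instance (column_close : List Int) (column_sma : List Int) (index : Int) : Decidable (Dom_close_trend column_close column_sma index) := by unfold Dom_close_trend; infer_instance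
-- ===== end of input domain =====

-- B replaces A's reset/increment counter loop by two all-quantified comparisons over the
-- 5-point window; equality is proved on Pre_ (all five accessed indices in range).

-- ===== PORT A =====
-- the loop body of A, named: state (close_leads, close_lags, index), range element unused
def close_trend_body (column_close : List Int) (column_sma : List Int)
    (st : Int × Int × Int) (_i : Int) : Int × Int × Int :=
  let c := PySem.List.pyGetD column_close st.2.2 0
  let s := PySem.List.pyGetD column_sma st.2.2 0
  if c < s then (0, st.2.1 + 1, st.2.2 + 1)
  else if c > s then (st.1 + 1, 0, st.2.2 + 1)
  else if c = s then (st.1 + 1, st.2.1 + 1, st.2.2 + 1)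
  else (st.1, st.2.1, st.2.2 + 1)

-- literal transliteration of A; list indexing is pyGetD (exact under Pre_)
def close_trend (column_close : List Int) (column_sma : List Int) (index : Int) : Int :=
  let st := (PySem.List.pyRange 0 5 1).foldl (close_trend_body column_close column_sma) (0, 0, index)
  if st.1 = 5 ∧ st.2.1 ≠ 5 then 1
  else if st.2.1 = 5 ∧ st.1 ≠ 5 then -1
  else 0

-- ===== PORT B =====
def close_trend_alt (column_close : List Int) (column_sma : List Int) (index : Int) : Int :=
  let leads := (PySem.List.pyRange 0 5 1).all
    (fun i => PySem.List.pyGetD column_close (index + i) 0 ≥ PySem.List.pyGetD column_sma (index + i) 0)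
  let lags := (PySem.List.pyRange 0 5 1).all
    (fun i => PySem.List.pyGetD column_close (index + i) 0 ≤ PySem.List.pyGetD column_sma (index + i) 0)
  if leads && !lags then 1
  else if lags && !leads then -1
  else 0

-- ===== PRECONDITION & SPEC =====
-- Pre_ excludes exactly the inputs where A raises IndexError:
-- some accessed index index+i (0 ≤ i < 5) out of range of either list.
def Pre_close_trend (column_close : List Int) (column_sma : List Int) (index : Int) : Prop :=
  -(column_close.length : Int) ≤ index ∧ index + 4 < (column_close.length : Int) ∧
  -(column_sma.length : Int) ≤ index ∧ index + 4 < (column_sma.length : Int)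
instance (column_close : List Int) (column_sma : List Int) (index : Int) : Decidable (Pre_close_trend column_close column_sma index) := by unfold Pre_close_trend; infer_instance

def pvWitness_close_trend : List Int × List Int × Int := ([1, 2, 3, 4, 5], [0, 0, 0, 0, 9], 0)

def Spec_close_trend (column_close : List Int) (column_sma : List Int) (index : Int) (out : Int) : Prop := out = close_trend_alt column_close column_sma index
instance (column_close : List Int) (column_sma : List Int) (index : Int) (out : Int) : Decidable (Spec_close_trend column_close column_sma index out) := by unfold Spec_close_trend; infer_instance

-- ===== CLAIM (what is proved, stated in full; the proofs are below) =====
def Claim_equal_close_trend : Prop := ∀ (column_close : List Int) (column_sma : List Int) (index : Int), Dom_close_trend column_close column_sma index → Pre_close_trend column_close column_sma index → Spec_close_trend column_close column_sma index (close_trend column_close column_sma index)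

-- ===== LEMMAS AND PROOFS =====
theorem pyRange05 : PySem.List.pyRange 0 5 1 = [0, 1, 2, 3, 4] := by decide

-- A's loop body on (value pair, counter pair), the moving index factored out
def pvStep (st : Int × Int) (p : Int × Int) : Int × Int :=
  if p.1 < p.2 then (0, st.2 + 1)
  else if p.1 > p.2 then (st.1 + 1, 0)
  else if p.1 = p.2 then (st.1 + 1, st.2 + 1)
  else st

-- loop invariant: a counter reaches init + length exactly when every pair keeps it incrementing
theorem pvInv (l : List (Int × Int)) : ∀ (a b : Int), 0 ≤ a → 0 ≤ b →
    (0 ≤ (l.foldl pvStep (a, b)).1 ∧ (l.foldl pvStep (a, b)).1 ≤ a + l.length ∧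
      ((l.foldl pvStep (a, b)).1 = a + l.length ↔ ∀ p ∈ l, p.2 ≤ p.1)) ∧
    (0 ≤ (l.foldl pvStep (a, b)).2 ∧ (l.foldl pvStep (a, b)).2 ≤ b + l.length ∧
      ((l.foldl pvStep (a, b)).2 = b + l.length ↔ ∀ p ∈ l, p.1 ≤ p.2)) := by
  induction l with
  | nil => intro a b ha hb; simp; omega
  | cons p l ih =>
    intro a b ha hb
    rcases lt_trichotomy p.1 p.2 with h | h | h
    · have hs : pvStep (a, b) p = (0, b + 1) := by simp [pvStep, h]
      have key := ih 0 (b + 1) le_rfl (by omega)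
      simp only [List.foldl_cons, hs, List.length_cons]
      push_cast
      refine ⟨⟨key.1.1, by omega, ?_⟩, ⟨key.2.1, by omega, ?_⟩⟩
      · constructor
        · intro he; exfalso; have := key.1.2.1; omega
        · intro hall; exfalso; have := hall p (by simp); omega
      · rw [show b + (↑l.length + 1) = (b + 1) + (l.length : Int) by ring, key.2.2.2]
        constructor
        · intro hall q hq
          rcases List.mem_cons.mp hq with rfl | hq
          · omega
          · exact hall _ hq
        · intro hall q hq; exact hall _ (List.mem_cons_of_mem _ hq)
    · have hs : pvStep (a, b) p = (a + 1, b + 1) := by simp [pvStep, h]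
      have key := ih (a + 1) (b + 1) (by omega) (by omega)
      simp only [List.foldl_cons, hs, List.length_cons]
      push_cast
      refine ⟨⟨key.1.1, by omega, ?_⟩, ⟨key.2.1, by omega, ?_⟩⟩
      · rw [show a + (↑l.length + 1) = (a + 1) + (l.length : Int) by ring, key.1.2.2]
        constructor
        · intro hall q hq
          rcases List.mem_cons.mp hq with rfl | hq
          · omega
          · exact hall _ hq
        · intro hall q hq; exact hall _ (List.mem_cons_of_mem _ hq)
      · rw [show b + (↑l.length + 1) = (b + 1) + (l.length : Int) by ring, key.2.2.2]
        constructor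
        · intro hall q hq
          rcases List.mem_cons.mp hq with rfl | hq
          · omega
          · exact hall _ hq
        · intro hall q hq; exact hall _ (List.mem_cons_of_mem _ hq)
    · have hs : pvStep (a, b) p = (a + 1, 0) := by simp [pvStep, h]; omega
      have key := ih (a + 1) 0 (by omega) le_rfl
      simp only [List.foldl_cons, hs, List.length_cons]
      push_cast
      refine ⟨⟨key.1.1, by omega, ?_⟩, ⟨key.2.1, by omega, ?_⟩⟩
      · rw [show a + (↑l.length + 1) = (a + 1) + (l.length : Int) by ring, key.1.2.2]
        constructor
        · intro hall q hq
          rcases List.mem_cons.mp hq with rfl | hq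
          · omega
          · exact hall _ hq
        · intro hall q hq; exact hall _ (List.mem_cons_of_mem _ hq)
      · constructor
        · intro he; exfalso; have := key.2.2.1; omega
        · intro hall; exfalso; have := hall p (by simp); omega

-- bridge: A's triple-state fold over any index list = pvStep fold over the looked-up pairs
theorem pvBridge (cc cs : List Int) (is : List Int) : ∀ (a b j : Int),
    is.foldl (close_trend_body cc cs) (a, b, j) =
      ((((List.range is.length).map (fun k : Nat =>
          (PySem.List.pyGetD cc (j + (k : Int)) 0, PySem.List.pyGetD cs (j + (k : Int)) 0))).foldl
          pvStep (a, b)).1,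
       (((List.range is.length).map (fun k : Nat =>
          (PySem.List.pyGetD cc (j + (k : Int)) 0, PySem.List.pyGetD cs (j + (k : Int)) 0))).foldl
          pvStep (a, b)).2,
       j + is.length) := by
  induction is with
  | nil => intro a b j; simp
  | cons i is ih =>
    intro a b j
    rw [List.foldl_cons, List.length_cons, List.range_succ_eq_map, List.map_cons, List.foldl_cons,
      List.map_map]
    have hmap :
        (List.map ((fun k : Nat => (PySem.List.pyGetD cc (j + (k : Int)) 0,
            PySem.List.pyGetD cs (j + (k : Int)) 0)) ∘ Nat.succ) (List.range is.length)) =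
        (List.map (fun k : Nat => (PySem.List.pyGetD cc ((j + 1) + (k : Int)) 0,
            PySem.List.pyGetD cs ((j + 1) + (k : Int)) 0)) (List.range is.length)) := by
      apply List.map_congr_left
      intro k _
      simp only [Function.comp, Nat.succ_eq_add_one, Prod.mk.injEq]
      push_cast
      constructor <;> congr 1 <;> ring
    have hbody : close_trend_body cc cs (a, b, j) i =
        (( pvStep (a, b) (PySem.List.pyGetD cc j 0, PySem.List.pyGetD cs j 0)).1,
         (pvStep (a, b) (PySem.List.pyGetD cc j 0, PySem.List.pyGetD cs j 0)).2, j + 1) := by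
      simp only [close_trend_body, pvStep]
      split_ifs <;> simp
    rw [hbody]
    have := ih (pvStep (a, b) (PySem.List.pyGetD cc j 0, PySem.List.pyGetD cs j 0)).1
      (pvStep (a, b) (PySem.List.pyGetD cc j 0, PySem.List.pyGetD cs j 0)).2 (j + 1)
    simp only [Nat.cast_add, Nat.cast_one] at this ⊢
    rw [hmap]
    simp only [CharP.cast_eq_zero, add_zero] at this ⊢
    rw [this]
    simp only [Prod.mk.injEq]
    refine ⟨trivial, trivial, ?_⟩
    ring

-- the final branch: counter form = all-quantified form, for any 5 pairs
theorem pvFinal (l : List (Int × Int)) (hl : l.length = 5) :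
    (if (l.foldl pvStep (0, 0)).1 = 5 ∧ (l.foldl pvStep (0, 0)).2 ≠ 5 then (1 : Int)
     else if (l.foldl pvStep (0, 0)).2 = 5 ∧ (l.foldl pvStep (0, 0)).1 ≠ 5 then -1
     else 0) =
    (if l.all (fun p => decide (p.2 ≤ p.1)) && !l.all (fun p => decide (p.1 ≤ p.2)) then 1
     else if l.all (fun p => decide (p.1 ≤ p.2)) && !l.all (fun p => decide (p.2 ≤ p.1)) then -1
     else 0) := by
  have key := pvInv l 0 0 le_rfl le_rfl
  rw [hl] at key
  push_cast at key
  have h1 : (l.foldl pvStep (0, 0)).1 = 5 ↔ l.all (fun p => decide (p.2 ≤ p.1)) = true := by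
    rw [key.1.2.2, List.all_eq_true]; simp
  have h2 : (l.foldl pvStep (0, 0)).2 = 5 ↔ l.all (fun p => decide (p.1 ≤ p.2)) = true := by
    rw [key.2.2.2, List.all_eq_true]; simp
  by_cases hL : l.all (fun p => decide (p.2 ≤ p.1)) = true <;>
    by_cases hG : l.all (fun p => decide (p.1 ≤ p.2)) = true
  · simp [hL, hG, h2.mpr hG, h1.mpr hL]
  · have hn2 : ¬(l.foldl pvStep (0, 0)).2 = 5 := fun h => hG (h2.mp h)
    simp [hL, hG, h1.mpr hL, hn2]
  · have hn1 : ¬(l.foldl pvStep (0, 0)).1 = 5 := fun h => hL (h1.mp h)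
    simp [hL, hG, h2.mpr hG, hn1]
  · have hn1 : ¬(l.foldl pvStep (0, 0)).1 = 5 := fun h => hL (h1.mp h)
    have hn2 : ¬(l.foldl pvStep (0, 0)).2 = 5 := fun h => hG (h2.mp h)
    simp [hL, hG, hn1, hn2]

-- ===== VERDICT (by name: the statement is the Claim_ definition above) =====
theorem close_trend_spec : Claim_equal_close_trend := by
  intro cc cs idx _hdom _hpre
  unfold Spec_close_trend close_trend close_trend_alt
  rw [pyRange05, pvBridge cc cs [0, 1, 2, 3, 4] 0 0 idx]
  have hlen : ((List.range ([0, 1, 2, 3, 4] : List Int).length).map (fun k : Nat =>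
      (PySem.List.pyGetD cc (idx + (k : Int)) 0, PySem.List.pyGetD cs (idx + (k : Int)) 0))).length = 5 := by
    simp
  rw [pvFinal _ hlen]
  simp [List.range_succ, ge_iff_le]
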